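-- pv_equiv track=rewrite | github.com/himinqq/algorithm_py | num_game.py | solution
-- ===== SOURCE A (Python) =====
-- from bisect import bisect_right
--
-- def solution(A, B):
--     answer = 0
--     B.sort()
--     used = [False] * len(B)
--
--     for a in A:
--         idx = bisect_right(B,a)
--         while idx < len(B) and used[idx]:
--             idx += 1
--         if idx < len(B):
--             answer += 1
--             used[idx] = True
--     # B팀원이 얻을 수 있는 최대 승점
--     # A > B 로 B 배열 조작할 때 얻을 수 있는 최댓값
--     return answer
-- ===== SOURCE B (Python) =====
-- def solution(A, B):
--     A_sorted = sorted(A)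
--     B.sort()
--     cnt = 0
--     i = 0
--     for b in B:
--         if i < len(A_sorted) and A_sorted[i] < b:
--             cnt += 1
--             i += 1
--     return cnt
-- ===== Notes on version B (the rewrite author's own statement) =====
-- stated objective: faster
-- what changed: Instead of, for each a in A, bisecting into sorted B and linearly scanning a used[] array past already-taken slots, B sorts both arrays once and counts matches with a single two-pointer pass over sorted B against sorted A.
import Mathlib
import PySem

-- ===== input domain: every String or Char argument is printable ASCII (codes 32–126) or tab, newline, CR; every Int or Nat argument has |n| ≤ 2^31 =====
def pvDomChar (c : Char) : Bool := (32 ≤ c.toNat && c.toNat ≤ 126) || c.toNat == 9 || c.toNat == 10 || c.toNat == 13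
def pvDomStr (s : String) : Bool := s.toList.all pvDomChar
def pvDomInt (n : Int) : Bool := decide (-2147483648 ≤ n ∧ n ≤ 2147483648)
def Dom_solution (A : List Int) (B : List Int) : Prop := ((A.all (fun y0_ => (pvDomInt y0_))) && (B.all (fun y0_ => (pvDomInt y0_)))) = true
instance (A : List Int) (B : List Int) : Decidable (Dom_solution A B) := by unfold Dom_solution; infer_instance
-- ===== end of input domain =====

-- B replaces A's per-element bisect + linear skip over a used[] array by sorting A once and
-- making a single two-pointer pass over sorted B (objective: faster). Both A and B sort the
-- argument list B in place (same observable mutation); the equivalence proved is about the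
-- return value.

-- ===== PORT A =====
-- while idx < len(B) and used[idx]: idx += 1   — the while loop, transcribed structurally:
-- advance idx past the leading True entries of the mask starting at idx
def skipUsed (u : List Bool) (i : Nat) : Nat := i + ((u.drop i).takeWhile (fun b => b)).length

-- body of `for a in A:` (s is the sorted B; state = (answer, used))
def stepA (s : List Int) (st : Int × List Bool) (a : Int) : Int × List Bool :=
  let idx := skipUsed st.2 (PySem.List.bisectRight s a)
  if idx < s.length then (st.1 + 1, st.2.set idx true) else st

def solution (A : List Int) (B : List Int) : Int :=
  let s := PySem.List.sorted B (fun x => x) false        -- B.sort()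
  (A.foldl (stepA s) (0, List.replicate s.length false)).1

-- ===== PORT B =====
-- for b in B_sorted: if i < len(A_sorted) and A_sorted[i] < b: cnt += 1; i += 1
-- (the index i into A_sorted becomes the remaining suffix of A_sorted)
def tp : List Int → List Int → Int
  | _, [] => 0
  | [], _ :: bs => tp [] bs
  | a :: as, b :: bs => if a < b then 1 + tp as bs else tp (a :: as) bs

def solution_alt (A : List Int) (B : List Int) : Int :=
  tp (PySem.List.sorted A (fun x => x) false) (PySem.List.sorted B (fun x => x) false)

-- ===== PRECONDITION & SPEC =====
def Spec_solution (A : List Int) (B : List Int) (out : Int) : Prop := out = solution_alt A B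
instance (A : List Int) (B : List Int) (out : Int) : Decidable (Spec_solution A B out) := by unfold Spec_solution; infer_instance

-- ===== CLAIM (what is proved, stated in full; the proofs are below) =====
def Claim_equal_solution : Prop := ∀ (A : List Int) (B : List Int), Dom_solution A B → Spec_solution A B (solution A B)

-- ===== LEMMAS AND PROOFS =====

-- remaining (unused) elements of s under mask u
def maskFilter : List Int → List Bool → List Int
  | [], _ => []
  | _ :: _, [] => []
  | x :: s, b :: u => if b then maskFilter s u else x :: maskFilter s u

-- remove the first element strictly greater than a (identity if none)
def rem (a : Int) : List Int → List Int
  | [] => []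
  | b :: t => if a < b then t else b :: rem a t

def cnt (a : Int) (m : List Int) : Int := if m.any (fun b => decide (a < b)) then 1 else 0

-- abstract form of A's loop: fold over A, each a removing the first remaining b > a
def g : List Int → List Int → Int
  | [], _ => 0
  | a :: as, m => cnt a m + g as (rem a m)

def tw (a : Int) (s : List Int) : Nat := (s.takeWhile (fun x => decide (x ≤ a))).length

lemma skipUsed_cons_succ (b : Bool) (u : List Bool) (i : Nat) :
    skipUsed (b :: u) (i + 1) = skipUsed u i + 1 := by
  simp [skipUsed]; omega

lemma skipUsed_cons_zero (b : Bool) (u : List Bool) :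
    skipUsed (b :: u) 0 = if b then skipUsed u 0 + 1 else 0 := by
  cases b <;> simp [skipUsed]

lemma rem_sublist (a : Int) (m : List Int) : (rem a m).Sublist m := by
  induction m with
  | nil => simp [rem]
  | cons b t ih =>
    by_cases h : a < b
    · simp [rem, h]
    · simpa [rem, h] using ih.cons₂ b

lemma rem_sorted {a : Int} {m : List Int} (hm : List.Pairwise (fun x y : Int => x ≤ y) m) :
    List.Pairwise (fun x y : Int => x ≤ y) (rem a m) := hm.sublist (rem_sublist a m)

lemma any_false_rem {a : Int} {m : List Int} (h : m.any (fun b => decide (a < b)) = false) :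
    rem a m = m := by
  induction m with
  | nil => rfl
  | cons b t ih =>
    simp only [List.any_cons, Bool.or_eq_false_iff] at h
    have hb : ¬ a < b := by simpa using h.1
    simp [rem, hb, ih h.2]

lemma g_nil_right (as : List Int) : g as [] = 0 := by
  induction as with
  | nil => rfl
  | cons a as ih => simp [g, cnt, rem, ih]

lemma tp_nil_left (m : List Int) : tp [] m = 0 := by
  induction m with
  | nil => rfl
  | cons b m ih => simpa [tp] using ih

-- tw characterization on a sorted list, and bisectRight = tw
lemma tw_le_length (a : Int) (s : List Int) : tw a s ≤ s.length := by
  simpa [tw] using (List.takeWhile_sublist (l := s) (p := fun x => decide (x ≤ a))).length_le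

lemma tw_get_lt (a : Int) : ∀ (s : List Int) (j : Nat) (hj : j < s.length), j < tw a s → s[j] ≤ a := by
  intro s
  induction s with
  | nil => intro j hj; simp at hj
  | cons x s ih =>
    intro j hj hlt
    by_cases hx : x ≤ a
    · cases j with
      | zero => simpa using hx
      | succ j =>
        have : j < tw a s := by
          simpa [tw, List.takeWhile_cons, hx] using hlt
        simpa using ih j (by simpa using hj) this
    · simp [tw, hx] at hlt
lemma tw_get_self (a : Int) : ∀ (s : List Int), (h : tw a s < s.length) → a < s[tw a s] := by
  intro s
  induction s with
  | nil => intro h; simp [tw] at h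
  | cons x s ih =>
    intro h
    by_cases hx : x ≤ a
    · have htw : tw a (x :: s) = tw a s + 1 := by simp [tw, hx]
      have h' : tw a s < s.length := by
        have := h; rw [htw] at this; simpa using this
      have := ih h'
      simp only [htw]
      simpa using this
    · have htw : tw a (x :: s) = 0 := by simp [tw, hx]
      simp only [htw]
      simpa using not_le.mp hx

lemma bisect_eq_tw {s : List Int} (hs : List.Pairwise (fun x y : Int => x ≤ y) s) (a : Int) :
    PySem.List.bisectRight s a = tw a s := by
  obtain ⟨h1, h2, h3⟩ := PySem.List.bisectRight_spec s a hs
  rcases Nat.lt_trichotomy (PySem.List.bisectRight s a) (tw a s) with h | h | h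
  · exfalso
    have hlen : PySem.List.bisectRight s a < s.length :=
      lt_of_lt_of_le h (tw_le_length a s)
    have hle := tw_get_lt a s _ hlen h
    have hgt := h3 _ hlen (le_refl _)
    exact absurd hle (not_le.mpr hgt)
  · exact h
  · exfalso
    have hlen : tw a s < s.length := lt_of_lt_of_le h h1
    have hle := h2 _ hlen h
    have hgt := tw_get_self a s hlen
    exact absurd hle (not_le.mpr hgt)

lemma tw_tail_zero {a x : Int} {s : List Int}
    (hs : List.Pairwise (fun x y : Int => x ≤ y) (x :: s)) (hax : a < x) : tw a s = 0 := by
  cases s with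
  | nil => rfl
  | cons y s' =>
    have hxy : x ≤ y := (List.pairwise_cons.mp hs).1 y (by simp)
    have : ¬ y ≤ a := not_le.mpr (lt_of_lt_of_le hax hxy)
    simp [tw, this]

-- the key step correspondence between A's mask machinery and rem/cnt on the remaining list
lemma step_main (a : Int) : ∀ (s : List Int) (u : List Bool),
    List.Pairwise (fun x y : Int => x ≤ y) s → u.length = s.length →
    ((skipUsed u (tw a s) < s.length →
        maskFilter s (u.set (skipUsed u (tw a s)) true) = rem a (maskFilter s u) ∧
        (maskFilter s u).any (fun b => decide (a < b)) = true) ∧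
     (s.length ≤ skipUsed u (tw a s) →
        (maskFilter s u).any (fun b => decide (a < b)) = false)) := by
  intro s
  induction s with
  | nil =>
    intro u _ hu
    have : u = [] := List.length_eq_zero_iff.mp (by simpa using hu)
    subst this
    constructor
    · intro h; simp [skipUsed] at h
    · intro _; simp [maskFilter]
  | cons x s ih =>
    intro u hs hu
    cases u with
    | nil => simp at hu
    | cons b u' =>
      have hu' : u'.length = s.length := by simpa using hu
      have hps : List.Pairwise (fun x y : Int => x ≤ y) s := (List.pairwise_cons.mp hs).2
      by_cases hxa : x ≤ a
      · have htw : tw a (x :: s) = tw a s + 1 := by simp [tw, hxa]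
        have hsk : skipUsed (b :: u') (tw a (x :: s)) = skipUsed u' (tw a s) + 1 := by
          rw [htw, skipUsed_cons_succ]
        obtain ⟨ih1, ih2⟩ := ih u' hps hu'
        have hnax : ¬ a < x := not_lt.mpr hxa
        cases b
        · -- head unused, value ≤ a : it stays, everything shifts by one
          constructor
          · intro h
            rw [hsk] at h
            have h' : skipUsed u' (tw a s) < s.length := by simpa using h
            obtain ⟨he, ha⟩ := ih1 h'
            refine ⟨?_, ?_⟩
            · rw [hsk]
              simp [maskFilter, List.set, rem, hnax, he]
            · simp [maskFilter, List.any_cons, hnax, ha]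
          · intro h
            rw [hsk] at h
            have h' : s.length ≤ skipUsed u' (tw a s) := by simpa using h
            have ha := ih2 h'
            simp [maskFilter, List.any_cons, hnax, ha]
        · -- head used : masked out on both sides
          constructor
          · intro h
            rw [hsk] at h
            have h' : skipUsed u' (tw a s) < s.length := by simpa using h
            obtain ⟨he, ha⟩ := ih1 h'
            refine ⟨?_, ?_⟩
            · rw [hsk]; simpa [maskFilter, List.set] using he
            · simpa [maskFilter] using ha
          · intro h
            rw [hsk] at h
            have h' : s.length ≤ skipUsed u' (tw a s) := by simpa using h
            simpa [maskFilter] using ih2 h'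
      · have hax : a < x := not_le.mp hxa
        have htw : tw a (x :: s) = 0 := by simp [tw, hxa]
        cases b
        · -- head unused and > a : it is chosen (idx = 0)
          have hsk : skipUsed (false :: u') (tw a (x :: s)) = 0 := by
            rw [htw, skipUsed_cons_zero]; simp
          constructor
          · intro _
            refine ⟨?_, ?_⟩
            · rw [hsk]
              simp [maskFilter, List.set, rem, hax]
            · simp [maskFilter, List.any_cons, hax]
          · intro h
            rw [hsk] at h
            simp at h
        · -- head used : masked out; tail is all > a as well
          have htw' : tw a s = 0 := tw_tail_zero hs hax
          have hsk : skipUsed (true :: u') (tw a (x :: s)) = skipUsed u' (tw a s) + 1 := by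
            rw [htw, skipUsed_cons_zero, htw']; simp
          obtain ⟨ih1, ih2⟩ := ih u' hps hu'
          constructor
          · intro h
            rw [hsk] at h
            have h' : skipUsed u' (tw a s) < s.length := by simpa using h
            obtain ⟨he, ha⟩ := ih1 h'
            refine ⟨?_, ?_⟩
            · rw [hsk]; simpa [maskFilter, List.set] using he
            · simpa [maskFilter] using ha
          · intro h
            rw [hsk] at h
            have h' : s.length ≤ skipUsed u' (tw a s) := by simpa using h
            simpa [maskFilter] using ih2 h'

lemma loopA (s : List Int) (hs : List.Pairwise (fun x y : Int => x ≤ y) s) :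
    ∀ (as : List Int) (u : List Bool) (ans : Int), u.length = s.length →
    (as.foldl (stepA s) (ans, u)).1 = ans + g as (maskFilter s u) := by
  intro as
  induction as with
  | nil => intro u ans _; simp [g]
  | cons a as ih =>
    intro u ans hu
    rw [List.foldl_cons]
    have hb : PySem.List.bisectRight s a = tw a s := bisect_eq_tw hs a
    obtain ⟨h1, h2⟩ := step_main a s u hs hu
    by_cases hj : skipUsed u (tw a s) < s.length
    · obtain ⟨he, ha⟩ := h1 hj
      have hstep : stepA s (ans, u) a = (ans + 1, u.set (skipUsed u (tw a s)) true) := by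
        simp [stepA, hb, hj]
      rw [hstep, ih _ _ (by simpa using hu), he]
      simp [g, cnt, ha]
      ring
    · have ha := h2 (not_lt.mp hj)
      have hstep : stepA s (ans, u) a = (ans, u) := by
        simp [stepA, hb, hj]
      rw [hstep, ih _ _ hu]
      simp [g, cnt, ha, any_false_rem ha]

lemma maskFilter_replicate (s : List Int) :
    maskFilter s (List.replicate s.length false) = s := by
  induction s with
  | nil => rfl
  | cons x s ih => simpa [maskFilter, List.replicate] using ih

lemma solution_eq_g (A B : List Int) :
    solution A B = g A (PySem.List.sorted B (fun x => x) false) := by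
  have hs : List.Pairwise (fun x y : Int => x ≤ y) (PySem.List.sorted B (fun x => x) false) := by
    simpa using PySem.List.sorted_pairwise B (fun x => x)
  have h := loopA _ hs A
      (List.replicate (PySem.List.sorted B (fun x => x) false).length false) 0
      (by simp)
  have hmr := maskFilter_replicate (PySem.List.sorted B (fun x => x) false)
  rw [hmr] at h
  simpa [solution] using h

-- exchange: two consecutive greedy steps on a sorted remaining list commute
lemma exch {a a' : Int} (hle : a ≤ a') : ∀ (m : List Int),
    List.Pairwise (fun x y : Int => x ≤ y) m →
    cnt a m + cnt a' (rem a m) = cnt a' m + cnt a (rem a' m) ∧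
    rem a' (rem a m) = rem a (rem a' m) := by
  intro m
  induction m with
  | nil => intro _; exact ⟨by simp [cnt, rem], by simp [rem]⟩
  | cons b t ih =>
    intro hm
    obtain ⟨hb, ht⟩ := List.pairwise_cons.mp hm
    by_cases h1 : a' < b
    · have h0 : a < b := lt_of_le_of_lt hle h1
      -- both would take the head; afterwards both see a tail whose elements all exceed a'
      have hall : ∀ y ∈ t, a' < y ∧ a < y := by
        intro y hy
        exact ⟨lt_of_lt_of_le h1 (hb y hy), lt_of_lt_of_le h0 (hb y hy)⟩
      cases t with
      | nil => simp [rem, cnt, h0, h1]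
      | cons c t' =>
        have hc := hall c (by simp)
        simp [rem, cnt, h0, h1, hc.1, hc.2]
    · by_cases h2 : b ≤ a
      · -- head matched by neither; recurse
        have hna : ¬ a < b := not_lt.mpr h2
        have hna' : ¬ a' < b := h1
        obtain ⟨ihc, ihr⟩ := ih ht
        constructor
        · simpa [rem, cnt, hna, hna', List.any_cons] using ihc
        · simp [rem, hna, hna', ihr]
      · -- a < b ≤ a' : a takes the head, a' skips it
        have h0 : a < b := not_le.mp h2
        have hba' : b ≤ a' := not_lt.mp h1
        have hna' : ¬ a' < b := h1
        constructor
        · simp [rem, cnt, h0, hna', List.any_cons]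
          ring
        · simp [rem, h0, hna']

lemma g_perm {as as' : List Int} (h : as.Perm as') :
    ∀ (m : List Int), List.Pairwise (fun x y : Int => x ≤ y) m → g as m = g as' m := by
  induction h with
  | nil => intro m _; rfl
  | cons x _ ih =>
    intro m hm
    simp only [g]
    rw [ih _ (rem_sorted hm)]
  | swap x y l =>
    intro m hm
    simp only [g]
    rcases le_total y x with hxy | hxy
    · obtain ⟨hc, hr⟩ := exch hxy m hm
      rw [hr]
      linarith
    · obtain ⟨hc, hr⟩ := exch hxy m hm
      rw [← hr]
      linarith
  | trans _ _ ih1 ih2 =>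
    intro m hm
    rw [ih1 m hm, ih2 m hm]

-- an element no larger than everything still to be matched can never be taken
lemma g_skip (b : Int) : ∀ (as t : List Int), (∀ x ∈ as, b ≤ x) →
    g as (b :: t) = g as t := by
  intro as
  induction as with
  | nil => intro t _; rfl
  | cons a as ih =>
    intro t hall
    have hba : b ≤ a := hall a (by simp)
    have hna : ¬ a < b := not_lt.mpr hba
    have hall' : ∀ x ∈ as, b ≤ x := fun x hx => hall x (by simp [hx])
    have e1 : rem a (b :: t) = b :: rem a t := by simp [rem, hna]
    have e2 : cnt a (b :: t) = cnt a t := by simp [cnt, hna]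
    simp only [g]
    rw [e1, e2, ih (rem a t) hall']

lemma g_eq_tp : ∀ (as : List Int), List.Pairwise (fun x y : Int => x ≤ y) as →
    ∀ (m : List Int), g as m = tp as m := by
  intro as
  induction as with
  | nil => intro _ m; rw [tp_nil_left]; rfl
  | cons a as iha =>
    intro has m
    obtain ⟨ha, hta⟩ := List.pairwise_cons.mp has
    induction m with
    | nil => simp [g, cnt, rem, g_nil_right, tp]
    | cons b m' ihm =>
      by_cases hab : a < b
      · simp only [g, cnt, rem, List.any_cons, hab]
        simp [iha hta m', tp, hab]
      · have hba : b ≤ a := not_lt.mp hab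
        have hall : ∀ x ∈ as, b ≤ x := fun x hx => le_trans hba (ha x hx)
        have e1 : rem a (b :: m') = b :: rem a m' := by simp [rem, hab]
        have e2 : cnt a (b :: m') = cnt a m' := by simp [cnt, hab]
        have : g (a :: as) (b :: m') = g (a :: as) m' := by
          simp only [g]
          rw [e1, e2, g_skip b as (rem a m') hall]
        rw [this, ihm]
        simp [tp, hab]

-- ===== VERDICT (by name: the statement is the Claim_ definition above) =====
theorem solution_spec : Claim_equal_solution := by
  intro A B _
  unfold Spec_solution solution_alt
  have hsB : List.Pairwise (fun x y : Int => x ≤ y) (PySem.List.sorted B (fun x => x) false) := by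
    simpa using PySem.List.sorted_pairwise B (fun x => x)
  have hsA : List.Pairwise (fun x y : Int => x ≤ y) (PySem.List.sorted A (fun x => x) false) := by
    simpa using PySem.List.sorted_pairwise A (fun x => x)
  rw [solution_eq_g,
      ← g_perm (PySem.List.sorted_perm A (fun x => x) false) _ hsB,
      g_eq_tp _ hsA]
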